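-- pv_equiv track=rewrite | github.com/7pk5/data_directory | src/core/domain_manager.py | _generate_basic_custom_queries
-- ===== SOURCE A (Python) =====
-- from typing import List, Dict, Tuple, Optional
--
-- def _generate_basic_custom_queries(domain_name: str, keywords: List[str], query_count: int) -> List[Dict]:
--     """Generate basic queries for custom domain"""
--     queries = []
--
--     # Basic templates
--     templates = [
--         f"{domain_name} companies in India",
--         f"{domain_name} manufacturers India",
--         f"{domain_name} directory India",
--         f"{domain_name} associations India",
--         f"{domain_name} database India",
--         f"{domain_name} exporters India",
--         f"{domain_name} industry India",
--         f"{domain_name} suppliers India",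
--         f"{domain_name} organizations India",
--         f"{domain_name} trade directory India"
--     ]
--
--     # Add keyword variations
--     for keyword in keywords[:3]:
--         templates.extend([
--             f"{keyword} companies India",
--             f"{keyword} directory India",
--             f"{keyword} associations India"
--         ])
--
--     # Add location-specific queries
--     major_cities = ["Mumbai", "Delhi", "Bangalore", "Chennai", "Pune"]
--     for city in major_cities[:3]:
--         templates.append(f"{domain_name} companies {city}")
--
--     # Ensure enough queries
--     while len(templates) < query_count:
--         templates.extend([
--             f"{domain_name} business directory",
--             f"{domain_name} trade associations",
--             f"{domain_name} export data India"
--         ])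
--
--     for i, template in enumerate(templates[:query_count]):
--         queries.append({
--             "query_id": f"custom_basic_{i+1}",
--             "domain": domain_name,
--             "search_query": template,
--             "query_type": "basic_custom",
--             "source": "rule_based_custom"
--         })
--
--     return queries
-- ===== SOURCE B (Python) =====
-- from typing import List, Dict
--
-- def _generate_basic_custom_queries(domain_name: str, keywords: List[str], query_count: int) -> List[Dict]:
--     """Generate basic queries for custom domain: the i-th template is computed directly
--     from i by index arithmetic (no template list is ever materialised, extended or sliced)."""
--     base = ("companies in India", "manufacturers India", "directory India",
--             "associations India", "database India", "exporters India",
--             "industry India", "suppliers India", "organizations India",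
--             "trade directory India")
--     kw_suffixes = ("companies India", "directory India", "associations India")
--     cities = ("Mumbai", "Delhi", "Bangalore")
--     pad = ("business directory", "trade associations", "export data India")
--     k = min(len(keywords), 3)
--
--     def nth_template(i):
--         if i < 10:
--             return f"{domain_name} {base[i]}"
--         j = i - 10
--         if j < 3 * k:
--             return f"{keywords[j // 3]} {kw_suffixes[j % 3]}"
--         j = j - 3 * k
--         if j < 3:
--             return f"{domain_name} companies {cities[j]}"
--         return f"{domain_name} {pad[(j - 3) % 3]}"
--
--     return [{"query_id": f"custom_basic_{i + 1}",
--              "domain": domain_name,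
--              "search_query": nth_template(i),
--              "query_type": "basic_custom",
--              "source": "rule_based_custom"}
--             for i in range(query_count)]
-- ===== Notes on version B (the rewrite author's own statement) =====
-- stated objective: alternative
-- what changed: Instead of A's build-a-template-list / extend-until-long-enough / slice-and-enumerate pipeline, B never materialises a template list: it computes the i-th template directly from the index i by arithmetic (block dispatch on i, with j//3 and j%3 selecting the keyword and its suffix, and a remainder selecting the padding string) inside one comprehension over range(query_count).
-- intended difference: On negative query_count that reaches back into the template list (-(13+3*min(len(keywords),3)) < query_count < 0), A's final slice templates[:query_count] wraps around and returns a nonempty list of queries; B returns the empty list, the intended result when zero or fewer queries are requested. — e.g. on _generate_basic_custom_queries("d", [], -12): A returns [[("query_id", "custom_basic_1"), ("domain", "d"), ("search_query", "d companies in India"), ("query_type", "basic_cust…, B returns []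
import Mathlib
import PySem

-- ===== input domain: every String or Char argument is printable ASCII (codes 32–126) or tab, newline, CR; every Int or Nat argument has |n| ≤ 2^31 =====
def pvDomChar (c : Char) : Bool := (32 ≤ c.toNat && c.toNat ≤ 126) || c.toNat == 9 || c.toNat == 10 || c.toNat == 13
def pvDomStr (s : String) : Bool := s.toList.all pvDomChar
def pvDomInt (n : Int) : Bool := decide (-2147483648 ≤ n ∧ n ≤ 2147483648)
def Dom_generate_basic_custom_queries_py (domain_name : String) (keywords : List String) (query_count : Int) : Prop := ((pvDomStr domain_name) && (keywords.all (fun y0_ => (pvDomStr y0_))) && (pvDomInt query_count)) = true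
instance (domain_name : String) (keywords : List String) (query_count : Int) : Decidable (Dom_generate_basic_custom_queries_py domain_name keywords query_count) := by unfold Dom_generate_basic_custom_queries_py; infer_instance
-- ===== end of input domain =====

-- B computes the i-th query's template directly from the index i by arithmetic (which block
-- i falls in, and a division/remainder inside the keyword and padding blocks), never
-- materialising, extending or slicing a template list (objective: alternative, same cost).

-- ===== PORT A =====
-- the three padding strings A's while loop appends
def pvPadA (domain_name : String) : List String :=
  [domain_name ++ " business directory",
   domain_name ++ " trade associations",
   domain_name ++ " export data India"]

-- 'while len(templates) < query_count: templates.extend([...])'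
def pvPadLoopA (domain_name : String) (query_count : Int) (ts : List String) : List String :=
  if (ts.length : Int) < query_count then
    pvPadLoopA domain_name query_count (ts ++ pvPadA domain_name)
  else ts
termination_by (query_count - ts.length).toNat
decreasing_by
  have h3 : (ts ++ pvPadA domain_name).length = ts.length + 3 := by simp [pvPadA]
  rw [h3]; omega

def generate_basic_custom_queries_py (domain_name : String) (keywords : List String) (query_count : Int) : List (List (String × String)) :=
  let templates0 : List String :=
    [domain_name ++ " companies in India",
     domain_name ++ " manufacturers India",
     domain_name ++ " directory India",
     domain_name ++ " associations India",
     domain_name ++ " database India",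
     domain_name ++ " exporters India",
     domain_name ++ " industry India",
     domain_name ++ " suppliers India",
     domain_name ++ " organizations India",
     domain_name ++ " trade directory India"]
  let templates1 := (PySem.List.slice keywords none (some 3)).foldl
    (fun ts keyword => ts ++
      [keyword ++ " companies India",
       keyword ++ " directory India",
       keyword ++ " associations India"]) templates0
  let major_cities : List String := ["Mumbai", "Delhi", "Bangalore", "Chennai", "Pune"]
  let templates2 := (PySem.List.slice major_cities none (some 3)).foldl
    (fun ts city => ts ++ [domain_name ++ (" companies " ++ city)]) templates1
  let templates3 := pvPadLoopA domain_name query_count templates2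
  (PySem.List.enumerate (PySem.List.slice templates3 none (some query_count)) 0).foldl
    (fun queries p => queries ++
      [[("query_id", "custom_basic_" ++ PySem.Int.toStr (p.1 + 1)),
        ("domain", domain_name),
        ("search_query", p.2),
        ("query_type", "basic_custom"),
        ("source", "rule_based_custom")]]) []

-- ===== PORT B =====
-- nth_template(i): the template at output position i, computed by index arithmetic.
-- Every tuple index below is guarded to be in range, so pyGetD's default is never used.
def pvNthTemplate (domain_name : String) (keywords : List String) (k : Int) (i : Int) : String :=
  if i < 10 then
    domain_name ++ (" " ++ PySem.List.pyGetD
      ["companies in India", "manufacturers India", "directory India",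
       "associations India", "database India", "exporters India",
       "industry India", "suppliers India", "organizations India",
       "trade directory India"] i "")
  else
    let j := i - 10
    if j < 3 * k then
      PySem.List.pyGetD keywords (PySem.Int.floordiv j 3) "" ++
        (" " ++ PySem.List.pyGetD
          ["companies India", "directory India", "associations India"]
          (PySem.Int.mod j 3) "")
    else
      let j2 := j - 3 * k
      if j2 < 3 then
        domain_name ++ (" companies " ++ PySem.List.pyGetD ["Mumbai", "Delhi", "Bangalore"] j2 "")
      else
        domain_name ++ (" " ++ PySem.List.pyGetD
          ["business directory", "trade associations", "export data India"]
          (PySem.Int.mod (j2 - 3) 3) "")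

def generate_basic_custom_queries_py_alt (domain_name : String) (keywords : List String) (query_count : Int) : List (List (String × String)) :=
  let k := min (PySem.List.len keywords) 3
  (PySem.List.pyRange 0 query_count 1).map (fun i =>
    [("query_id", "custom_basic_" ++ PySem.Int.toStr (i + 1)),
     ("domain", domain_name),
     ("search_query", pvNthTemplate domain_name keywords k i),
     ("query_type", "basic_custom"),
     ("source", "rule_based_custom")])

-- ===== PRECONDITION & SPEC =====
-- On negative query_count that does not reach back past the start of the template list, A's
-- final Python slice templates[:query_count] wraps around and returns a NONEMPTY query list
-- (len(templates)+query_count queries) for a negative requested count, an artefact of slice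
-- semantics; B returns the intended empty list (zero or fewer queries requested → no queries).
def D_generate_basic_custom_queries_py (domain_name : String) (keywords : List String) (query_count : Int) : Prop :=
  query_count < 0 ∧ 0 < query_count + (13 + 3 * min (keywords.length : Int) 3)
instance (domain_name : String) (keywords : List String) (query_count : Int) : Decidable (D_generate_basic_custom_queries_py domain_name keywords query_count) := by unfold D_generate_basic_custom_queries_py; infer_instance

def Spec_generate_basic_custom_queries_py (domain_name : String) (keywords : List String) (query_count : Int) (out : List (List (String × String))) : Prop := ¬ D_generate_basic_custom_queries_py domain_name keywords query_count → out = generate_basic_custom_queries_py_alt domain_name keywords query_count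
instance (domain_name : String) (keywords : List String) (query_count : Int) (out : List (List (String × String))) : Decidable (Spec_generate_basic_custom_queries_py domain_name keywords query_count out) := by unfold Spec_generate_basic_custom_queries_py; infer_instance

def pvDiffWitness_generate_basic_custom_queries_py : String × List String × Int := ("d", [], -12)
def pvDiffWitnessOut_generate_basic_custom_queries_py : (List (List (String × String))) × (List (List (String × String))) :=
  ([[("query_id", "custom_basic_1"),
     ("domain", "d"),
     ("search_query", "d companies in India"),
     ("query_type", "basic_custom"),
     ("source", "rule_based_custom")]], [])

-- ===== CLAIM (what is proved, stated in full; the proofs are below) =====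
def Claim_unchanged_generate_basic_custom_queries_py : Prop := ∀ (domain_name : String) (keywords : List String) (query_count : Int), Dom_generate_basic_custom_queries_py domain_name keywords query_count → Spec_generate_basic_custom_queries_py domain_name keywords query_count (generate_basic_custom_queries_py domain_name keywords query_count)
def Claim_changed_generate_basic_custom_queries_py : Prop := Dom_generate_basic_custom_queries_py (pvDiffWitness_generate_basic_custom_queries_py.1) (pvDiffWitness_generate_basic_custom_queries_py.2.1) (pvDiffWitness_generate_basic_custom_queries_py.2.2) ∧ D_generate_basic_custom_queries_py (pvDiffWitness_generate_basic_custom_queries_py.1) (pvDiffWitness_generate_basic_custom_queries_py.2.1) (pvDiffWitness_generate_basic_custom_queries_py.2.2) ∧ generate_basic_custom_queries_py (pvDiffWitness_generate_basic_custom_queries_py.1) (pvDiffWitness_generate_basic_custom_queries_py.2.1) (pvDiffWitness_generate_basic_custom_queries_py.2.2) = pvDiffWitnessOut_generate_basic_custom_queries_py.1 ∧ generate_basic_custom_queries_py_alt (pvDiffWitness_generate_basic_custom_queries_py.1) (pvDiffWitness_generate_basic_custom_queries_py.2.1) (pvDiffWitness_generate_basic_custom_queries_py.2.2) = pvDiffWitnessOut_generate_basic_custom_queries_py.2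 ∧ pvDiffWitnessOut_generate_basic_custom_queries_py.1 ≠ pvDiffWitnessOut_generate_basic_custom_queries_py.2
def Claim_exact_generate_basic_custom_queries_py : Prop := ∀ (domain_name : String) (keywords : List String) (query_count : Int), Dom_generate_basic_custom_queries_py domain_name keywords query_count → D_generate_basic_custom_queries_py domain_name keywords query_count → generate_basic_custom_queries_py domain_name keywords query_count ≠ generate_basic_custom_queries_py_alt domain_name keywords query_count

-- ===== LEMMAS AND PROOFS =====

-- the full pre-padding template list (proved equal to A's fold result)
def pvTempl (dn : String) (kws : List String) : List String :=
  (["companies in India", "manufacturers India", "directory India",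
    "associations India", "database India", "exporters India",
    "industry India", "suppliers India", "organizations India",
    "trade directory India"].map (fun s => dn ++ (" " ++ s)))
  ++ (kws.take 3).flatMap
       (fun kw => ["companies India", "directory India", "associations India"].map
         (fun s => kw ++ (" " ++ s)))
  ++ ["Mumbai", "Delhi", "Bangalore"].map (fun c => dn ++ (" companies " ++ c))

-- the template A/B select at output position k, given the pre-padding list ts
def pvPick (dn : String) (ts : List String) (k : Nat) : String :=
  if k < ts.length then ts.getD k "" else (pvPadA dn).getD ((k - ts.length) % 3) ""

-- one output dict
def pvRow (dn : String) (i : Int) (t : String) : List (String × String) :=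
  [("query_id", "custom_basic_" ++ PySem.Int.toStr (i + 1)),
   ("domain", dn), ("search_query", t),
   ("query_type", "basic_custom"), ("source", "rule_based_custom")]

theorem pvTempl_length (dn : String) (kws : List String) :
    (pvTempl dn kws).length = 13 + 3 * min 3 kws.length := by
  simp [pvTempl, List.length_flatMap]
  omega

theorem pvA_templates_eq (dn : String) (kws : List String) :
    (PySem.List.slice ["Mumbai", "Delhi", "Bangalore", "Chennai", "Pune"] none (some 3)).foldl
      (fun ts city => ts ++ [dn ++ (" companies " ++ city)])
      ((PySem.List.slice kws none (some 3)).foldl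
        (fun ts keyword => ts ++
          [keyword ++ " companies India",
           keyword ++ " directory India",
           keyword ++ " associations India"])
        [dn ++ " companies in India", dn ++ " manufacturers India", dn ++ " directory India",
         dn ++ " associations India", dn ++ " database India", dn ++ " exporters India",
         dn ++ " industry India", dn ++ " suppliers India", dn ++ " organizations India",
         dn ++ " trade directory India"]) = pvTempl dn kws := by
  have hc : PySem.List.slice ["Mumbai", "Delhi", "Bangalore", "Chennai", "Pune"] none (some 3)
      = ["Mumbai", "Delhi", "Bangalore"] := by decide
  have hk : PySem.List.slice kws none (some 3) = kws.take 3 := by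
    rw [PySem.List.slice_to _ (by norm_num : (0:Int) ≤ 3)]
    rfl
  rw [hc, hk, PySem.List.foldl_append_eq_flatMap, PySem.List.foldl_append_eq_flatMap]
  simp only [List.append_assoc]
  rfl

theorem pvPadLoop_take (dn : String) (qc : Int) (hqc : 0 ≤ qc) :
    ∀ ts : List String,
      (pvPadLoopA dn qc ts).take qc.toNat = (List.range qc.toNat).map (pvPick dn ts) := by
  intro ts
  induction ts using pvPadLoopA.induct dn qc with
  | case1 ts hlt ih =>
    rw [pvPadLoopA, if_pos hlt, ih]
    refine List.map_congr_left (fun k hk => ?_)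
    rw [List.mem_range] at hk
    have h3 : (ts ++ pvPadA dn).length = ts.length + 3 := by simp [pvPadA]
    unfold pvPick
    rw [h3]
    by_cases h1 : k < ts.length
    · rw [if_pos (by omega), if_pos h1, List.getD_append _ _ _ _ h1]
    · by_cases h2 : k < ts.length + 3
      · rw [if_pos h2, if_neg h1, List.getD_append_right _ _ _ _ (by omega),
          Nat.mod_eq_of_lt (by omega)]
      · rw [if_neg h2, if_neg h1]
        have hsplit : k - ts.length = (k - (ts.length + 3)) + 3 := by omega
        rw [hsplit, Nat.add_mod_right]
  | case2 ts hlt =>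
    rw [pvPadLoopA, if_neg hlt]
    apply List.ext_getElem
    · simp; omega
    · intro k h1 h2
      simp only [List.getElem_take, List.getElem_map, List.getElem_range]
      have hk : k < qc.toNat := by simpa using h2
      rw [pvPick, if_pos (by omega), List.getD_eq_getElem _ _ (by omega)]

theorem pvEnum_map_range {α : Type} (f : Nat → α) (n : Nat) :
    PySem.List.enumerate ((List.range n).map f) 0
      = (List.range n).map (fun (k : Nat) => ((k : Int), f k)) := by
  apply List.ext_getElem
  · simp [PySem.List.length_enumerate]
  · intro k h1 h2
    rw [PySem.List.getElem_enumerate]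
    simp

theorem pvA_eq_map (dn : String) (kws : List String) (qc : Int) (hqc : 0 ≤ qc) :
    generate_basic_custom_queries_py dn kws qc
      = (List.range qc.toNat).map
          (fun (k : Nat) => pvRow dn (k : Int) (pvPick dn (pvTempl dn kws) k)) := by
  simp only [generate_basic_custom_queries_py]
  rw [pvA_templates_eq, PySem.List.foldl_append_singleton_eq_map,
    PySem.List.slice_to _ hqc, pvPadLoop_take dn qc hqc, pvEnum_map_range, List.map_map]
  simp only [List.nil_append]
  rfl

-- flatMap over blocks of 3: the element at position j is block j/3, entry j%3
theorem pvFlatMap3_getD {α β : Type} (g : α → List β) (h3 : ∀ x, (g x).length = 3)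
    (d : β) (d' : α) : ∀ (t : List α) (j : Nat), j < 3 * t.length →
      (t.flatMap g).getD j d = (g (t.getD (j / 3) d')).getD (j % 3) d := by
  intro t
  induction t with
  | nil => intro j hj; simp at hj
  | cons x t ih =>
    intro j hj
    simp only [List.flatMap_cons]
    by_cases h : j < 3
    · rw [List.getD_append _ _ _ _ (by rw [h3]; omega),
        Nat.div_eq_of_lt h, Nat.mod_eq_of_lt h]
      rfl
    · rw [List.getD_append_right _ _ _ _ (by rw [h3]; omega), h3]
      rw [ih (j - 3) (by simp at hj ⊢; omega)]
      have hd : (j - 3) / 3 = j / 3 - 1 := by omega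
      have hm : (j - 3) % 3 = j % 3 := by omega
      rw [hd, hm]
      cases hq : j / 3 with
      | zero => omega
      | succ m => simp

-- pvTempl's element in the base block
theorem pvTempl_getD_base (dn : String) (kws : List String) (n : Nat) (h : n < 10) :
    (pvTempl dn kws).getD n ""
      = dn ++ (" " ++ (["companies in India", "manufacturers India", "directory India",
          "associations India", "database India", "exporters India",
          "industry India", "suppliers India", "organizations India",
          "trade directory India"] : List String).getD n "") := by
  unfold pvTempl
  rw [List.getD_append _ _ _ _ (by simp [List.length_flatMap]; omega),
      List.getD_append _ _ _ _ (by simp; omega)]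
  interval_cases n <;> rfl

-- pvTempl's element in the keyword block
theorem pvTempl_getD_kw (dn : String) (kws : List String) (n : Nat)
    (h1 : 10 ≤ n) (h2 : n < 10 + 3 * min 3 kws.length) :
    (pvTempl dn kws).getD n ""
      = kws.getD ((n - 10) / 3) "" ++ (" " ++ (["companies India", "directory India",
          "associations India"] : List String).getD ((n - 10) % 3) "") := by
  unfold pvTempl
  rw [List.getD_append _ _ _ _ (by simp [List.length_flatMap]; omega),
      List.getD_append_right _ _ _ _ (by simp; omega)]
  have h10 : (List.map (fun s => dn ++ (" " ++ s))
      ["companies in India", "manufacturers India", "directory India",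
       "associations India", "database India", "exporters India",
       "industry India", "suppliers India", "organizations India",
       "trade directory India"]).length = 10 := by simp
  rw [h10, pvFlatMap3_getD _ (by intro x; simp) "" "" (kws.take 3) (n - 10) (by simp; omega)]
  have htake : (kws.take 3).getD ((n - 10) / 3) "" = kws.getD ((n - 10) / 3) "" := by
    rw [List.getD_eq_getElem?_getD, List.getD_eq_getElem?_getD, List.getElem?_take,
      if_pos (by omega)]
  rw [htake]
  have hm : (n - 10) % 3 < 3 := Nat.mod_lt _ (by omega)
  set m := (n - 10) % 3 with hmdef
  interval_cases m <;> rfl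

-- pvTempl's element in the city block
theorem pvTempl_getD_city (dn : String) (kws : List String) (n : Nat)
    (h1 : 10 + 3 * min 3 kws.length ≤ n) (h2 : n < 13 + 3 * min 3 kws.length) :
    (pvTempl dn kws).getD n ""
      = dn ++ (" companies " ++ (["Mumbai", "Delhi", "Bangalore"] : List String).getD
          (n - 10 - 3 * min 3 kws.length) "") := by
  unfold pvTempl
  rw [List.getD_append_right _ _ _ _ (by simp [List.length_flatMap]; omega)]
  have hl : (List.map (fun s => dn ++ (" " ++ s))
      ["companies in India", "manufacturers India", "directory India",
       "associations India", "database India", "exporters India",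
       "industry India", "suppliers India", "organizations India",
       "trade directory India"] ++
      (kws.take 3).flatMap (fun kw => ["companies India", "directory India",
        "associations India"].map (fun s => kw ++ (" " ++ s)))).length
      = 10 + 3 * min 3 kws.length := by simp [List.length_flatMap]; omega
  rw [hl]
  have hm : n - (10 + 3 * min 3 kws.length) = n - 10 - 3 * min 3 kws.length := by omega
  rw [hm]
  have hlt : n - 10 - 3 * min 3 kws.length < 3 := by omega
  set m := n - 10 - 3 * min 3 kws.length with hmdef
  interval_cases m <;> rfl

-- B's per-index template equals the pick into the common template list
theorem pvNth_eq_pick (dn : String) (kws : List String) (n : Nat) :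
    pvNthTemplate dn kws (min (PySem.List.len kws) 3) (n : Int)
      = pvPick dn (pvTempl dn kws) n := by
  have hK : min (PySem.List.len kws) 3 = ((min 3 kws.length : Nat) : Int) := by
    simp [PySem.List.len_eq]; omega
  set K : Nat := min 3 kws.length with hKdef
  have hlen := pvTempl_length dn kws
  rw [hK]
  unfold pvNthTemplate pvPick
  by_cases h10 : n < 10
  · rw [if_pos (by exact_mod_cast h10), if_pos (by omega), PySem.List.pyGetD_natCast,
      pvTempl_getD_base dn kws n h10]
  · rw [if_neg (by exact_mod_cast h10)]
    by_cases hkw : n < 10 + 3 * K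
    · have hj : ((n : Int) - 10) = (((n - 10 : Nat)) : Int) := by omega
      have hdiv : PySem.Int.floordiv (((n - 10 : Nat)) : Int) 3 = (((n - 10) / 3 : Nat) : Int) := by
        exact_mod_cast PySem.Int.floordiv_natCast (n - 10) 3
      have hmod : PySem.Int.mod (((n - 10 : Nat)) : Int) 3 = (((n - 10) % 3 : Nat) : Int) := by
        exact_mod_cast PySem.Int.mod_natCast (n - 10) 3
      rw [hj, if_pos (by push_cast; omega), if_pos (by omega), hdiv, hmod,
        PySem.List.pyGetD_natCast, PySem.List.pyGetD_natCast,
        pvTempl_getD_kw dn kws n (by omega) (by omega)]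
    · have hjneg : ¬ ((n : Int) - 10 < 3 * ((K : Nat) : Int)) := by push_cast; omega
      rw [if_neg hjneg]
      by_cases hcity : n < 13 + 3 * K
      · have hj2 : (n : Int) - 10 - 3 * ((K : Nat) : Int) = ((n - 10 - 3 * K : Nat) : Int) := by
          push_cast; omega
        rw [hj2, if_pos (by exact_mod_cast (by omega : (n - 10 - 3 * K : Nat) < 3)),
          if_pos (by omega), PySem.List.pyGetD_natCast,
          pvTempl_getD_city dn kws n (by omega) (by omega)]
      · have hj2 : (n : Int) - 10 - 3 * ((K : Nat) : Int) - 3 = ((n - 13 - 3 * K : Nat) : Int) := by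
          push_cast; omega
        have hmod : PySem.Int.mod (((n - 13 - 3 * K : Nat)) : Int) 3
            = (((n - 13 - 3 * K) % 3 : Nat) : Int) := by
          exact_mod_cast PySem.Int.mod_natCast (n - 13 - 3 * K) 3
        rw [if_neg (by push_cast; omega), if_neg (by omega), hj2, hmod,
          PySem.List.pyGetD_natCast]
        have hsub : n - (pvTempl dn kws).length = n - 13 - 3 * K := by omega
        rw [hsub]
        have hmlt : (n - 13 - 3 * K) % 3 < 3 := Nat.mod_lt _ (by omega)
        set m := (n - 13 - 3 * K) % 3 with hmdef
        interval_cases m <;> rfl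

theorem pvB_eq_map (dn : String) (kws : List String) (qc : Int) (hqc : 0 ≤ qc) :
    generate_basic_custom_queries_py_alt dn kws qc
      = (List.range qc.toNat).map
          (fun (k : Nat) => pvRow dn (k : Int) (pvPick dn (pvTempl dn kws) k)) := by
  simp only [generate_basic_custom_queries_py_alt]
  rw [PySem.List.pyRange_one]
  simp only [Int.sub_zero, List.map_map]
  refine List.map_congr_left (fun k hk => ?_)
  simp only [Function.comp_apply, Int.zero_add, pvRow]
  rw [pvNth_eq_pick]

theorem pvB_neg (dn : String) (kws : List String) (qc : Int) (h : qc < 0) :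
    generate_basic_custom_queries_py_alt dn kws qc = [] := by
  simp only [generate_basic_custom_queries_py_alt]
  rw [PySem.List.pyRange_one]
  rw [show (qc - 0).toNat = 0 from by omega]
  rfl

theorem pvA_neg (dn : String) (kws : List String) (qc : Int) (h : qc < 0) :
    generate_basic_custom_queries_py dn kws qc
      = (PySem.List.enumerate
          ((pvTempl dn kws).take ((pvTempl dn kws).length - (-qc).toNat)) 0).map
          (fun p => pvRow dn p.1 p.2) := by
  simp only [generate_basic_custom_queries_py]
  rw [pvA_templates_eq, pvPadLoopA, if_neg (by omega),
    show (some qc) = some (-(((-qc).toNat : Nat) : Int)) from by rw [Int.toNat_of_nonneg (by omega)]; ring_nf,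
    PySem.List.slice_to_neg_natCast _ _ (by omega),
    PySem.List.foldl_append_singleton_eq_map]
  rfl

-- ===== VERDICT (by name: the statement is the Claim_ definition above) =====
theorem generate_basic_custom_queries_py_spec : Claim_unchanged_generate_basic_custom_queries_py := by
  intro dn kws qc hdom hD
  by_cases hqc : 0 ≤ qc
  · rw [pvA_eq_map dn kws qc hqc, pvB_eq_map dn kws qc hqc]
  · have hneg : qc < 0 := by omega
    unfold D_generate_basic_custom_queries_py at hD
    push Not at hD
    have hbound := hD hneg
    rw [pvB_neg dn kws qc hneg, pvA_neg dn kws qc hneg, pvTempl_length,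
      show 13 + 3 * min 3 kws.length - (-qc).toNat = 0 from by omega]
    rfl

theorem generate_basic_custom_queries_py_changed : Claim_changed_generate_basic_custom_queries_py := by
  unfold Claim_changed_generate_basic_custom_queries_py
  refine ⟨by decide, by decide, ?_, by decide, by decide⟩
  rw [pvA_neg _ _ _ (by decide)]
  decide

theorem generate_basic_custom_queries_py_tight : Claim_exact_generate_basic_custom_queries_py := by
  intro dn kws qc hdom hD
  unfold D_generate_basic_custom_queries_py at hD
  obtain ⟨h1, h2⟩ := hD
  rw [pvB_neg dn kws qc h1, pvA_neg dn kws qc h1]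
  intro hEq
  have hlen := congrArg List.length hEq
  simp [PySem.List.length_enumerate] at hlen
  have hL := pvTempl_length dn kws
  omega
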